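-- pv_equiv track=rewrite | github.com/mpolatcan/kubehawk | kubeagle/screens/detail/components/fix_details_modal.py | _parse_file_marker_sections
-- ===== SOURCE A (Python) =====
-- def _parse_file_marker_sections(content: str) -> list[tuple[str, str]]:
--     lines = content.splitlines()
--     sections: list[tuple[str, str]] = []
--     current_file = ""
--     current_lines: list[str] = []
--     for line in lines:
--         if line.startswith("# FILE:"):
--             if current_file:
--                 section_text = "\n".join(current_lines).rstrip()
--                 sections.append((current_file, f"{section_text}\n" if section_text else ""))
--             current_file = line.replace("# FILE:", "", 1).strip() or "templates/unknown.diff"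
--             current_lines = []
--             continue
--         current_lines.append(line)
--     if current_file:
--         section_text = "\n".join(current_lines).rstrip()
--         sections.append((current_file, f"{section_text}\n" if section_text else ""))
--     return sections
-- ===== SOURCE B (Python) =====
-- def _marker_groups(lines):
--     if not lines:
--         return []
--     name = lines[0][len("# FILE:"):].strip() or "templates/unknown.diff"
--     body = []
--     rest = lines[1:]
--     while rest and not rest[0].startswith("# FILE:"):
--         body.append(rest[0])
--         rest = rest[1:]
--     text = "\n".join(body).rstrip()
--     return [(name, text + "\n" if text else "")] + _marker_groups(rest)
--
--
-- def _parse_file_marker_sections(content: str) -> list[tuple[str, str]]: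
--     lines = content.splitlines()
--     while lines and not lines[0].startswith("# FILE:"):
--         lines = lines[1:]
--     return _marker_groups(lines)
-- ===== Notes on version B (the rewrite author's own statement) =====
-- stated objective: simpler
-- what changed: A's single pass with mutable current_file/current_lines state and flush-on-marker (plus a final flush) is replaced by a two-phase decomposition: drop the preamble lines, then recursively split the rest into marker-headed groups (header + span of body lines) and format each group.
import Mathlib
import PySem

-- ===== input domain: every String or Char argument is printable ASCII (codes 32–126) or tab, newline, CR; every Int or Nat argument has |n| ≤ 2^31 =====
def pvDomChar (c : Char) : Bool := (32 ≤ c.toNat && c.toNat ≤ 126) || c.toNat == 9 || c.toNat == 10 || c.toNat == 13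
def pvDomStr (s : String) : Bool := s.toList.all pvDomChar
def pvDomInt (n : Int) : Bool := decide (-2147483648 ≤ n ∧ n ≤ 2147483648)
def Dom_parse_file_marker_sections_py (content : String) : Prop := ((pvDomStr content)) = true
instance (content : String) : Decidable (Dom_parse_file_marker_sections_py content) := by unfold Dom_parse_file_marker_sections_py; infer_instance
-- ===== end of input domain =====

-- B replaces A's single accumulator loop (leftover current_file/current_lines state, flush on each
-- marker and once more at the end) by a simpler decomposition: drop the preamble, then recursively
-- split the remaining lines into marker-headed groups; objective: simpler, same cost.

-- ===== PORT A =====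
-- hand port of Python's s.replace(old, new, 1) (count = 1, no PySem primitive):
-- exact — replaces only the leftmost occurrence of old, if any ('' found at index 0)
def pvReplace1 (s old new : String) : String :=
  let i := PySem.Chars.find s.toList old.toList
  if i = -1 then s
  else String.ofList (s.toList.take i.toNat ++ new.toList ++ s.toList.drop (i.toNat + old.toList.length))

def pvLoopA : List String → String → List String → List (String × String) → List (String × String)
  | [], curFile, curLines, sections =>
      if curFile ≠ "" then
        let t := PySem.Str.rstrip (PySem.Str.join "\n" curLines)
        sections ++ [(curFile, if t ≠ "" then t ++ "\n" else "")]
      else sections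
  | line :: ls, curFile, curLines, sections =>
      if PySem.Str.startswith line "# FILE:" then
        let sections' :=
          if curFile ≠ "" then
            let t := PySem.Str.rstrip (PySem.Str.join "\n" curLines)
            sections ++ [(curFile, if t ≠ "" then t ++ "\n" else "")]
          else sections
        let r := PySem.Str.strip (pvReplace1 line "# FILE:" "")
        pvLoopA ls (if r ≠ "" then r else "templates/unknown.diff") [] sections'
      else
        pvLoopA ls curFile (curLines ++ [line]) sections

def parse_file_marker_sections_py (content : String) : List (String × String) :=
  pvLoopA (PySem.Str.splitlines content) "" [] []

-- ===== PORT B =====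
def pvMarkerGroups : List String → List (String × String)
  | [] => []
  | l0 :: rest =>
      let name0 := PySem.Str.strip (PySem.Str.slice l0 (some 7) none)
      let name := if name0 ≠ "" then name0 else "templates/unknown.diff"
      let body := rest.takeWhile (fun l => !PySem.Str.startswith l "# FILE:")
      let rest' := rest.dropWhile (fun l => !PySem.Str.startswith l "# FILE:")
      let t := PySem.Str.rstrip (PySem.Str.join "\n" body)
      [(name, if t ≠ "" then t ++ "\n" else "")] ++ pvMarkerGroups rest'
termination_by lines => lines.length
decreasing_by
  simp only [List.length_cons]
  exact Nat.lt_succ_of_le (List.length_dropWhile_le _ _)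

def parse_file_marker_sections_py_alt (content : String) : List (String × String) :=
  pvMarkerGroups ((PySem.Str.splitlines content).dropWhile (fun l => !PySem.Str.startswith l "# FILE:"))

-- ===== PRECONDITION & SPEC =====
def Spec_parse_file_marker_sections_py (content : String) (out : List (String × String)) : Prop := out = parse_file_marker_sections_py_alt content
instance (content : String) (out : List (String × String)) : Decidable (Spec_parse_file_marker_sections_py content out) := by unfold Spec_parse_file_marker_sections_py; infer_instance

-- ===== CLAIM (what is proved, stated in full; the proofs are below) =====
def Claim_equal_parse_file_marker_sections_py : Prop := ∀ (content : String), Dom_parse_file_marker_sections_py content → Spec_parse_file_marker_sections_py content (parse_file_marker_sections_py content)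

-- ===== LEMMAS AND PROOFS =====

-- the (file, text) pair both programs build from a header name and a body line list
def pvFmt (f : String) (cs : List String) : String × String :=
  let t := PySem.Str.rstrip (PySem.Str.join "\n" cs)
  (f, if t ≠ "" then t ++ "\n" else "")

lemma pvFind_prefix {s sub : List Char} (h : sub <+: s) : PySem.Chars.find s sub = 0 := by
  have hinf : sub <:+: s := h.isInfix
  have hne : PySem.Chars.find s sub ≠ -1 := (PySem.Chars.find_ne_neg_one_iff _ _).mpr hinf
  have hnn : 0 ≤ PySem.Chars.find s sub := (PySem.Chars.find_nonneg_iff _ _).mpr hinf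
  have hk : (0 : ℕ) ≤ s.length := Nat.zero_le _
  have hspec := PySem.Chars.findFrom_natCast_spec s sub 0 hk
  rw [Nat.cast_zero, PySem.Chars.findFrom_zero] at hspec
  have := hspec hne
  by_contra hne0
  have hpos : 0 < (PySem.Chars.find s sub).toNat := by omega
  have := this.2.2 0 (le_refl _) hpos
  simp at this
  exact this h

lemma pvName_eq {l : String} (h : PySem.Str.startswith l "# FILE:" = true) :
    pvReplace1 l "# FILE:" "" = PySem.Str.slice l (some 7) none := by
  have hmC : PySem.Chars.startswith l.toList "# FILE:".toList = true := by simpa using h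
  have hpre : "# FILE:".toList <+: l.toList := (PySem.Chars.startswith_iff _ _).mp hmC
  have hf : PySem.Chars.find l.toList "# FILE:".toList = 0 := pvFind_prefix hpre
  unfold pvReplace1
  rw [hf]
  apply String.toList_inj.mp
  have hs : PySem.Str.slice l (some 7) none = String.ofList (PySem.List.slice l.toList (some 7) none) :=
    String.toList_inj.mp (by simp)
  rw [hs, PySem.List.slice_from _ (by norm_num)]
  simp

lemma pvName_ne {r : String} : (if r ≠ "" then r else "templates/unknown.diff") ≠ "" := by
  by_cases hr : r = "" <;> simp [hr]

lemma pvLoopA_eq (ls : List String) : ∀ (f : String) (cs : List String) (acc : List (String × String)),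
    pvLoopA ls f cs acc = acc ++
      (if f = "" then pvMarkerGroups (ls.dropWhile (fun l => !PySem.Str.startswith l "# FILE:"))
       else pvFmt f (cs ++ ls.takeWhile (fun l => !PySem.Str.startswith l "# FILE:")) ::
            pvMarkerGroups (ls.dropWhile (fun l => !PySem.Str.startswith l "# FILE:"))) := by
  induction ls with
  | nil =>
      intro f cs acc
      by_cases hf : f = "" <;> simp [pvLoopA, hf, pvMarkerGroups, pvFmt]
  | cons l ls ih =>
      intro f cs acc
      by_cases hm : PySem.Str.startswith l "# FILE:" = true
      · have hmC : PySem.Chars.startswith l.toList ['#', ' ', 'F', 'I', 'L', 'E', ':'] = true := by simpa using hm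
        have hdw : (l :: ls).dropWhile (fun l => !PySem.Str.startswith l "# FILE:") = l :: ls := by
          simp [hmC]
        have htw : (l :: ls).takeWhile (fun l => !PySem.Str.startswith l "# FILE:") = [] := by
          simp [hmC]
        rw [hdw, htw]
        show pvLoopA (l :: ls) f cs acc = _
        rw [pvLoopA]
        simp only [hm, reduceIte]
        rw [ih]
        rw [if_neg pvName_ne]
        rw [pvMarkerGroups]
        by_cases hf : f = "" <;>
          simp [hf, pvFmt, pvName_eq hm, List.append_assoc]
      · have hm' : PySem.Str.startswith l "# FILE:" = false := by simpa using hm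
        rw [pvLoopA]
        simp only [hm', Bool.false_eq_true, if_false]
        rw [ih]
        have hmC' : PySem.Chars.startswith l.toList ['#', ' ', 'F', 'I', 'L', 'E', ':'] = false := by simpa using hm'
        by_cases hf : f = "" <;>
          simp [hf, hmC', pvFmt, List.append_assoc]

-- ===== VERDICT (by name: the statement is the Claim_ definition above) =====
theorem parse_file_marker_sections_py_spec : Claim_equal_parse_file_marker_sections_py := by
  intro content _
  show parse_file_marker_sections_py content = parse_file_marker_sections_py_alt content
  unfold parse_file_marker_sections_py parse_file_marker_sections_py_alt
  rw [pvLoopA_eq]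
  simp
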